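-- pv_equiv track=rewrite | github.com/tigcho/aoc-2024 | day09/diskfrag.py | get_file_spans
-- ===== SOURCE A (Python) =====
-- def get_file_spans(blocks):
--     # dictionary of file_id: (start_pos, length)
--     file_spans = {}
--     current_file = None
--     start_pos = 0
--     length = 0
--
--     for i, block in enumerate(blocks):
--         if block != '.':
--             if current_file is None:
--                 current_file = block
--                 start_pos = i
--                 length = 1
--             elif block == current_file:
--                 length += 1
--             else:
--                 file_spans[current_file] = (start_pos, length)
--                 current_file = block
--                 start_pos = i
--                 length = 1
--         elif current_file is not None:
--             file_spans[current_file] = (start_pos, length)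
--             current_file = None
--             length = 0
--
--     if current_file is not None:
--         file_spans[current_file] = (start_pos, length)
--
--     return file_spans
-- ===== SOURCE B (Python) =====
-- def get_file_spans(blocks):
--     # Run-based scan: jump over each maximal run of equal blocks at once.
--     file_spans = {}
--     i = 0
--     n = len(blocks)
--     while i < n:
--         j = i + 1
--         while j < n and blocks[j] == blocks[i]:
--             j += 1
--         if blocks[i] != '.':
--             file_spans[blocks[i]] = (i, j - i)
--         i = j
--     return file_spans
-- ===== Notes on version B (the rewrite author's own statement) =====
-- stated objective: alternative
-- what changed: Replaces A's per-block state machine (current_file/start_pos/length with flush-on-change and a trailing flush) by a run-based scan that finds each maximal run of equal blocks with an inner advance and records non-'.' runs directly, no carried state to flush.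
import Mathlib
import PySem

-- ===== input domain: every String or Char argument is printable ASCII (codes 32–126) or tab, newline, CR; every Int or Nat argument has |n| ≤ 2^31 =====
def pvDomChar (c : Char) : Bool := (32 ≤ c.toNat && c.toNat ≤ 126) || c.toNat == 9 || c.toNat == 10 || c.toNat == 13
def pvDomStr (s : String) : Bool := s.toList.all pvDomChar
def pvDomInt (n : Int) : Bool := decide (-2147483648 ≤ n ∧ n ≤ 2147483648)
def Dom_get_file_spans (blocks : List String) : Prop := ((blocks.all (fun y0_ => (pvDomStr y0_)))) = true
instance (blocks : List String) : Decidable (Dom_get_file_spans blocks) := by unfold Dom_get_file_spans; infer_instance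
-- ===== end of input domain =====

-- B replaces A's per-block state machine by a run-based scan (jump over maximal runs); equal return value, same O(n) cost.

-- ===== PORT A =====
-- A's loop over enumerate(blocks) with state (file_spans, current_file, start_pos, length)
def pvLoopA : List (Int × String) → PySem.Dict String (Int × Int) → Option String → Int → Int →
    PySem.Dict String (Int × Int)
  | [], d, cf, sp, len =>
    -- the trailing 'if current_file is not None' flush
    match cf with
    | none => d
    | some c => d.insert c (sp, len)
  | (i, b) :: rest, d, cf, sp, len =>
    if b ≠ "." then
      match cf with
      | none => pvLoopA rest d (some b) i 1
      | some c =>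
        if b = c then pvLoopA rest d (some c) sp (len + 1)
        else pvLoopA rest (d.insert c (sp, len)) (some b) i 1
    else
      match cf with
      | some c => pvLoopA rest (d.insert c (sp, len)) none sp 0
      | none => pvLoopA rest d none sp len

def get_file_spans (blocks : List String) : List (String × Int × Int) :=
  (pvLoopA (PySem.List.enumerate blocks 0) PySem.Dict.empty none 0 0).items

-- ===== PORT B =====
-- B's outer while loop: at position i with remaining suffix l, the inner while-loop
-- advance 'j' counts the maximal run of blocks[i] (= 1 + takeWhile length), then jumps.
def pvLoopB : List String → Int → PySem.Dict String (Int × Int) → PySem.Dict String (Int × Int)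
  | [], _, d => d
  | x :: xs, i, d =>
    let k : Nat := (xs.takeWhile (· == x)).length
    let d' := if x ≠ "." then d.insert x (i, (k : Int) + 1) else d
    pvLoopB (xs.dropWhile (· == x)) (i + ((k : Int) + 1)) d'
termination_by l _ _ => l.length
decreasing_by
  simp only [List.length_cons]
  exact Nat.lt_succ_of_le (List.dropWhile_sublist _).length_le

def get_file_spans_alt (blocks : List String) : List (String × Int × Int) :=
  (pvLoopB blocks 0 PySem.Dict.empty).items

-- ===== PRECONDITION & SPEC =====
def Spec_get_file_spans (blocks : List String) (out : List (String × Int × Int)) : Prop := out = get_file_spans_alt blocks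
instance (blocks : List String) (out : List (String × Int × Int)) : Decidable (Spec_get_file_spans blocks out) := by unfold Spec_get_file_spans; infer_instance

-- ===== CLAIM (what is proved, stated in full; the proofs are below) =====
def Claim_equal_get_file_spans : Prop := ∀ (blocks : List String), Dom_get_file_spans blocks → Spec_get_file_spans blocks (get_file_spans blocks)

-- ===== LEMMAS AND PROOFS =====

theorem pvLoopB_nil (i : Int) (d : PySem.Dict String (Int × Int)) : pvLoopB [] i d = d := by
  rw [pvLoopB]

theorem pvLoopB_cons (x : String) (xs : List String) (i : Int) (d : PySem.Dict String (Int × Int)) :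
    pvLoopB (x :: xs) i d
      = pvLoopB (xs.dropWhile (· == x)) (i + (((xs.takeWhile (· == x)).length : Int) + 1))
          (if x ≠ "." then d.insert x (i, ((xs.takeWhile (· == x)).length : Int) + 1) else d) := by
  rw [pvLoopB]

-- A's loop skips over a prefix of '.' blocks while current_file is None.
theorem pvLoopA_dots (t r : List String) (ht : ∀ y ∈ t, y = ".") :
    ∀ (i : Int) (d : PySem.Dict String (Int × Int)) (sp len : Int),
      pvLoopA (PySem.List.enumerate (t ++ r) i) d none sp len
        = pvLoopA (PySem.List.enumerate r (i + t.length)) d none sp len := by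
  induction t with
  | nil => intro i d sp len; simp
  | cons y t ih =>
    intro i d sp len
    have hy : y = "." := ht y (by simp)
    subst hy
    rw [List.cons_append, PySem.List.enumerate_cons]
    simp only [pvLoopA, if_neg (by simp : ¬ ("." : String) ≠ ".")]
    rw [ih (fun z hz => ht z (by simp [hz])) (i + 1) d sp len]
    rw [show i + 1 + (t.length : Int) = i + ((("." :: t).length : Nat) : Int) by
      push_cast [List.length_cons]; ring]

-- A's loop extends the current run over a prefix of blocks equal to current_file ≠ '.'.
theorem pvLoopA_run (x : String) (hx : x ≠ ".") (t r : List String) (ht : ∀ y ∈ t, y = x) :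
    ∀ (i : Int) (d : PySem.Dict String (Int × Int)) (sp len : Int),
      pvLoopA (PySem.List.enumerate (t ++ r) i) d (some x) sp len
        = pvLoopA (PySem.List.enumerate r (i + t.length)) d (some x) sp (len + t.length) := by
  induction t with
  | nil => intro i d sp len; simp
  | cons y t ih =>
    intro i d sp len
    have hy : y = x := ht y (by simp)
    subst hy
    rw [List.cons_append, PySem.List.enumerate_cons]
    simp only [pvLoopA, if_pos hx]
    rw [ih (fun z hz => ht z (by simp [hz])) (i + 1) d sp (len + 1)]
    rw [show i + 1 + (t.length : Int) = i + (((y :: t).length : Nat) : Int) by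
        push_cast [List.length_cons]; ring,
      show len + 1 + (t.length : Int) = len + (((y :: t).length : Nat) : Int) by
        push_cast [List.length_cons]; ring]
    simp

theorem pv_take_all (l : List String) (x : String) :
    ∀ y ∈ l.takeWhile (· == x), y = x := by
  intro y hy
  have := List.mem_takeWhile_imp hy
  simpa using this

theorem pv_drop_head (l : List String) (x y : String)
    (h : (l.dropWhile (· == x)).head? = some y) : y ≠ x := by
  have := List.head?_dropWhile_not (· == x) l
  intro he; subst he; rw [h] at this; simp at this

-- Main invariant, by strong induction on the suffix length:
-- (1) from a 'between runs' state (current_file = None) A's loop equals B's loop;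
-- (2) from a 'just after the run of c' state (head ≠ c) A's loop equals B's loop
--     started after inserting c's pending span.
theorem pvLoop_main : ∀ (n : Nat) (l : List String), l.length ≤ n →
    ((∀ (i : Int) (d : PySem.Dict String (Int × Int)) (sp len : Int),
        pvLoopA (PySem.List.enumerate l i) d none sp len = pvLoopB l i d) ∧
     (∀ (c : String), c ≠ "." → (∀ y, l.head? = some y → y ≠ c) →
        ∀ (i : Int) (d : PySem.Dict String (Int × Int)) (sp len : Int),
          pvLoopA (PySem.List.enumerate l i) d (some c) sp len
            = pvLoopB l i (d.insert c (sp, len)))) := by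
  intro n
  induction n with
  | zero =>
    intro l hl
    have : l = [] := List.eq_nil_of_length_eq_zero (Nat.le_zero.mp hl)
    subst this
    constructor
    · intro i d sp len; simp [PySem.List.enumerate, pvLoopA, pvLoopB_nil]
    · intro c _ _ i d sp len; simp [PySem.List.enumerate, pvLoopA, pvLoopB_nil]
  | succ n ih =>
    intro l hl
    match l with
    | [] =>
      constructor
      · intro i d sp len; simp [PySem.List.enumerate, pvLoopA, pvLoopB_nil]
      · intro c _ _ i d sp len; simp [PySem.List.enumerate, pvLoopA, pvLoopB_nil]
    | x :: xs =>
      have hxs : xs.length ≤ n := by simpa using hl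
      have hsplit : xs.takeWhile (· == x) ++ xs.dropWhile (· == x) = xs :=
        List.takeWhile_append_dropWhile
      have hrlen : (xs.dropWhile (· == x)).length ≤ n :=
        le_trans (List.dropWhile_sublist _).length_le hxs
      have hreq : ∀ y, (xs.dropWhile (· == x)).head? = some y → y ≠ x :=
        fun y hy => pv_drop_head xs x y hy
      have htall : ∀ y ∈ xs.takeWhile (· == x), y = x := pv_take_all xs x
      constructor
      · -- (1) current_file = None
        intro i d sp len
        rw [PySem.List.enumerate_cons, pvLoopB_cons]
        by_cases hx : x = "."
        · subst hx
          simp only [pvLoopA, if_neg (by simp : ¬ ("." : String) ≠ ".")]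
          conv_lhs => rw [← hsplit]
          rw [pvLoopA_dots _ _ htall (i + 1) d sp len]
          rw [((ih _ hrlen).1) (i + 1 + ((xs.takeWhile (· == ".")).length : Int)) d sp len]
          rw [show i + 1 + ((xs.takeWhile (· == ".")).length : Int)
              = i + (((xs.takeWhile (· == ".")).length : Int) + 1) by ring]
        · simp only [pvLoopA, if_pos hx]
          conv_lhs => rw [← hsplit]
          rw [pvLoopA_run x hx _ _ htall (i + 1) d i 1]
          rw [((ih _ hrlen).2) x hx hreq (i + 1 + ((xs.takeWhile (· == x)).length : Int)) d i
              (1 + ((xs.takeWhile (· == x)).length : Int))]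
          rw [show i + 1 + ((xs.takeWhile (· == x)).length : Int)
              = i + (((xs.takeWhile (· == x)).length : Int) + 1) by ring,
            show (1 : Int) + ((xs.takeWhile (· == x)).length : Int)
              = ((xs.takeWhile (· == x)).length : Int) + 1 by ring]
      · -- (2) current_file = some c, x ≠ c
        intro c hc hne i d sp len
        have hxc : x ≠ c := hne x rfl
        rw [PySem.List.enumerate_cons, pvLoopB_cons]
        by_cases hx : x = "."
        · subst hx
          simp only [pvLoopA, if_neg (by simp : ¬ ("." : String) ≠ ".")]
          conv_lhs => rw [← hsplit]
          rw [pvLoopA_dots _ _ htall (i + 1) (d.insert c (sp, len)) sp 0]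
          rw [((ih _ hrlen).1) (i + 1 + ((xs.takeWhile (· == ".")).length : Int))
              (d.insert c (sp, len)) sp 0]
          rw [show i + 1 + ((xs.takeWhile (· == ".")).length : Int)
              = i + (((xs.takeWhile (· == ".")).length : Int) + 1) by ring]
        · simp only [pvLoopA, if_pos hx, if_neg hxc]
          conv_lhs => rw [← hsplit]
          rw [pvLoopA_run x hx _ _ htall (i + 1) (d.insert c (sp, len)) i 1]
          rw [((ih _ hrlen).2) x hx hreq (i + 1 + ((xs.takeWhile (· == x)).length : Int))
              (d.insert c (sp, len)) i (1 + ((xs.takeWhile (· == x)).length : Int))]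
          rw [show i + 1 + ((xs.takeWhile (· == x)).length : Int)
              = i + (((xs.takeWhile (· == x)).length : Int) + 1) by ring,
            show (1 : Int) + ((xs.takeWhile (· == x)).length : Int)
              = ((xs.takeWhile (· == x)).length : Int) + 1 by ring]

-- ===== VERDICT (by name: the statement is the Claim_ definition above) =====
theorem get_file_spans_spec : Claim_equal_get_file_spans := by
  intro blocks _
  unfold Spec_get_file_spans get_file_spans get_file_spans_alt
  rw [(pvLoop_main blocks.length blocks le_rfl).1 0 PySem.Dict.empty 0 0]
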